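-- pv_equiv track=rewrite | github.com/seanzmc/27vette | scripts/reconcile_confident_subset_to_canonical.py | source_ref_member_plan
-- ===== SOURCE A (Python) =====
-- from typing import Any
--
-- def clean(value: Any) -> str:
--     if value is None:
--         return ""
--     return str(value).strip()
--
-- def pipe_values(value: str) -> list[str]:
--     return [item for item in clean(value).split("|") if item]
--
-- def source_ref_member_plan(selectables: list[dict[str, str]], source_refs: dict[str, dict[str, str]], targets: dict[str, str]) -> list[dict[str, Any]]:
--     out = []
--     for row in sorted(selectables, key=lambda item: (clean(item.get("model_key", "")), clean(item.get("orderable_rpo", "")), clean(item.get("proposal_selectable_id", "")))):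
--         proposal_id = clean(row.get("proposal_selectable_id", ""))
--         for ref_id in pipe_values(row.get("source_ref_ids", "")):
--             ref = source_refs.get(ref_id, {})
--             out.append(
--                 {
--                     "proposal_selectable_id": proposal_id,
--                     "proposed_target_table": "catalog/selectables.csv",
--                     "proposed_target_row_key": targets.get(proposal_id, ""),
--                     "source_ref_id": ref_id,
--                     "source_sheet": ref.get("source_sheet", ""),
--                     "source_row": ref.get("source_row", ""),
--                     "notes": "source_refs_member_table plan only; no canonical source refs written.",
--                 }
--             )
--     return out
-- ===== SOURCE B (Python) =====
-- def clean(value):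
--     if value is None:
--         return ""
--     return str(value).strip()
--
--
-- def pipe_values(value):
--     return [item for item in clean(value).split("|") if item]
--
--
-- def source_ref_member_plan(selectables, source_refs, targets):
--     # Flatten first, tagging each emitted row with its selectable's sort key,
--     # then one stable sort on the tag; stability reproduces A's order exactly.
--     tagged = []
--     for row in selectables:
--         proposal_id = clean(row.get("proposal_selectable_id", ""))
--         key = (clean(row.get("model_key", "")), clean(row.get("orderable_rpo", "")), proposal_id)
--         for ref_id in pipe_values(row.get("source_ref_ids", "")):
--             ref = source_refs.get(ref_id, {})
--             tagged.append(
--                 (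
--                     key,
--                     {
--                         "proposal_selectable_id": proposal_id,
--                         "proposed_target_table": "catalog/selectables.csv",
--                         "proposed_target_row_key": targets.get(proposal_id, ""),
--                         "source_ref_id": ref_id,
--                         "source_sheet": ref.get("source_sheet", ""),
--                         "source_row": ref.get("source_row", ""),
--                         "notes": "source_refs_member_table plan only; no canonical source refs written.",
--                     },
--                 )
--             )
--     tagged.sort(key=lambda kr: kr[0])
--     return [r for _, r in tagged]
-- ===== Notes on version B (the rewrite author's own statement) =====
-- stated objective: alternative
-- what changed: B flattens every selectable into its tagged output rows first and then performs one stable sort of the flat row list by the composite key taken from the source selectable, instead of A's sort-the-selectables-then-flatten.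
import Mathlib
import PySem

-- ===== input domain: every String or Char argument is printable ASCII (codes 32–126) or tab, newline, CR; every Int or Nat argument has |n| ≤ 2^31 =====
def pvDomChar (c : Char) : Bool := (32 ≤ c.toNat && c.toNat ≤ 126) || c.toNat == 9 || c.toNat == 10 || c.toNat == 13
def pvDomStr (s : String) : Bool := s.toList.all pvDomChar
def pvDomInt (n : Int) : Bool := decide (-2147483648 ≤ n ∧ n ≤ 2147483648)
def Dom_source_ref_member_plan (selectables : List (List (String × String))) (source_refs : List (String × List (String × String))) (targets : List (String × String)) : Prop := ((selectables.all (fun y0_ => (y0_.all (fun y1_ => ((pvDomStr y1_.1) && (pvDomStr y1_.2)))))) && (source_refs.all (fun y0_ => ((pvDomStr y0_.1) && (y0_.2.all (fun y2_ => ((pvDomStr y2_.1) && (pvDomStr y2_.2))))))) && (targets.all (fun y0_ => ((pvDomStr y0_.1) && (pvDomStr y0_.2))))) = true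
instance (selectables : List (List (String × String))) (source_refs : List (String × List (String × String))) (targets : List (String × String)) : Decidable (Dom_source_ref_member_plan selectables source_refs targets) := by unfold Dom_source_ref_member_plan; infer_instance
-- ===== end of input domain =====

-- B flattens every selectable into its tagged output rows first, then does ONE stable sort of the
-- flat row list keyed by the composite key of the source selectable (objective: alternative decomposition).

-- ===== PORT A =====
-- clean(value): value is always a str here (dict.get with a str default), so the None branch is dead; .strip() is PySem.Str.strip
def srmClean (s : String) : String := PySem.Str.strip s

-- row.get(k, dflt) / source_refs.get(...) / targets.get(...)
def srmGetS (d : List (String × String)) (k dflt : String) : String := (PySem.Dict.mk d).getD k dflt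
def srmGetD (d : List (String × List (String × String))) (k : String) : List (String × String) := (PySem.Dict.mk d).getD k []

-- pipe_values: [item for item in clean(value).split("|") if item]  (split? is total here since the sep "|" is nonempty)
def srmPipe (s : String) : List String := ((PySem.Str.split? (srmClean s) "|").getD []).filter (fun item => item ≠ "")

-- the lexicographic order on List String = Python's tuple-of-strings comparison (named so both ports use one instance)
@[reducible] def srmOrd : LinearOrder (List String) := inferInstance

-- the sort key tuple; a Python tuple of 3 strings compares lexicographically = Lean's lex order on List String
def srmKey (row : List (String × String)) : List String :=
  [srmClean (srmGetS row "model_key" ""),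
   srmClean (srmGetS row "orderable_rpo" ""),
   srmClean (srmGetS row "proposal_selectable_id" "")]

-- the emitted dict literal (identical text in both Pythons)
def srmRow (source_refs : List (String × List (String × String))) (targets : List (String × String))
    (pid ref_id : String) : List (String × String) :=
  let ref := srmGetD source_refs ref_id
  [("proposal_selectable_id", pid),
   ("proposed_target_table", "catalog/selectables.csv"),
   ("proposed_target_row_key", srmGetS targets pid ""),
   ("source_ref_id", ref_id),
   ("source_sheet", srmGetS ref "source_sheet" ""),
   ("source_row", srmGetS ref "source_row" ""),
   ("notes", "source_refs_member_table plan only; no canonical source refs written.")]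

def source_ref_member_plan (selectables : List (List (String × String))) (source_refs : List (String × List (String × String))) (targets : List (String × String)) : List (List (String × String)) :=
  (@PySem.List.sorted _ _ srmOrd.toLT srmOrd.toDecidableLT selectables srmKey false).foldl
    (fun out row =>
      let pid := srmClean (srmGetS row "proposal_selectable_id" "")
      (srmPipe (srmGetS row "source_ref_ids" "")).foldl
        (fun out ref_id => out ++ [srmRow source_refs targets pid ref_id]) out)
    []

-- ===== PORT B =====
def source_ref_member_plan_alt (selectables : List (List (String × String))) (source_refs : List (String × List (String × String))) (targets : List (String × String)) : List (List (String × String)) :=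
  let tagged : List (List String × List (String × String)) :=
    selectables.foldl
      (fun acc row =>
        let pid := srmClean (srmGetS row "proposal_selectable_id" "")
        let key : List String :=
          [srmClean (srmGetS row "model_key" ""), srmClean (srmGetS row "orderable_rpo" ""), pid]
        (srmPipe (srmGetS row "source_ref_ids" "")).foldl
          (fun acc ref_id => acc ++ [(key, srmRow source_refs targets pid ref_id)]) acc)
      []
  (@PySem.List.sorted _ _ srmOrd.toLT srmOrd.toDecidableLT tagged (fun kr => kr.1) false).map (fun kr => kr.2)

-- ===== PRECONDITION & SPEC =====
def Spec_source_ref_member_plan (selectables : List (List (String × String))) (source_refs : List (String × List (String × String))) (targets : List (String × String)) (out : List (List (String × String))) : Prop := out = source_ref_member_plan_alt selectables source_refs targets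
instance (selectables : List (List (String × String))) (source_refs : List (String × List (String × String))) (targets : List (String × String)) (out : List (List (String × String))) : Decidable (Spec_source_ref_member_plan selectables source_refs targets out) := by unfold Spec_source_ref_member_plan; infer_instance

-- ===== CLAIM (what is proved, stated in full; the proofs are below) =====
def Claim_equal_source_ref_member_plan : Prop := ∀ (selectables : List (List (String × String))) (source_refs : List (String × List (String × String))) (targets : List (String × String)), Dom_source_ref_member_plan selectables source_refs targets → Spec_source_ref_member_plan selectables source_refs targets (source_ref_member_plan selectables source_refs targets)

-- ===== LEMMAS AND PROOFS =====

-- insertBy passes over a prefix none of whose elements come after x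
theorem insertBy_append_not {α : Type} (before : α → α → Bool) (x : α) (p s : List α)
    (h : ∀ y ∈ p, before x y = false) :
    PySem.List.insertBy before x (p ++ s) = p ++ PySem.List.insertBy before x s := by
  induction p with
  | nil => rfl
  | cons y ys ih =>
    simp only [List.cons_append, PySem.List.insertBy, h y (by simp)]
    simp only [Bool.false_eq_true, if_false, List.cons.injEq, true_and]
    exact ih (fun z hz => h z (by simp [hz]))

-- insertBy prepends when every element comes after x
theorem insertBy_cons_all {α : Type} (before : α → α → Bool) (x : α) (s : List α)
    (h : ∀ y ∈ s, before x y = true) :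
    PySem.List.insertBy before x s = x :: s := by
  cases s with
  | nil => rfl
  | cons y ys => simp [PySem.List.insertBy, h y (by simp)]

-- inserting an element whose key is one of the (strictly increasing) block keys lands it at the end of its block
theorem insertBy_blocks {α κ : Type} [LinearOrder κ] (k : α → κ) :
    ∀ (ks : List κ), ks.Pairwise (· < ·) → ∀ (l : List α) (x : α), k x ∈ ks →
      PySem.List.insertBy (fun a b => decide (k a < k b)) x
          (ks.flatMap (fun c => l.filter (fun z => decide (k z = c))))
        = ks.flatMap (fun c => (l ++ [x]).filter (fun z => decide (k z = c))) := by
  intro ks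
  induction ks with
  | nil => intro _ l x hx; simp at hx
  | cons c ks ih =>
    intro hpw l x hx
    have hc : ∀ d ∈ ks, c < d := fun d hd => (List.pairwise_cons.1 hpw).1 d hd
    have hpw' : ks.Pairwise (· < ·) := (List.pairwise_cons.1 hpw).2
    simp only [List.flatMap_cons]
    by_cases hxc : k x = c
    · -- x joins the head block; tail blocks are unchanged
      have htail : ∀ d ∈ ks, ((l ++ [x]).filter (fun z => decide (k z = d)))
          = l.filter (fun z => decide (k z = d)) := by
        intro d hd
        have hne : k x ≠ d := by rw [hxc]; exact ne_of_lt (hc d hd)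
        simp [List.filter_append, hne]
      rw [insertBy_append_not]
      · rw [insertBy_cons_all]
        · have hhead : (l ++ [x]).filter (fun z => decide (k z = c))
              = l.filter (fun z => decide (k z = c)) ++ [x] := by
            simp [List.filter_append, hxc]
          rw [hhead]
          have : (ks.flatMap fun d => (l ++ [x]).filter (fun z => decide (k z = d)))
              = ks.flatMap fun d => l.filter (fun z => decide (k z = d)) :=
            List.flatMap_congr (fun d hd => htail d hd)
          rw [this]; simp
        · intro y hy
          rcases List.mem_flatMap.1 hy with ⟨d, hd, hyd⟩
          have : k y = d := of_decide_eq_true (List.mem_filter.1 hyd).2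
          simp [this, hxc ▸ hc d hd]
      · intro y hy
        have : k y = c := of_decide_eq_true (List.mem_filter.1 hy).2
        simp [this, hxc]
    · -- x belongs to a later block
      have hx' : k x ∈ ks := by
        rcases List.mem_cons.1 hx with h | h
        · exact absurd h hxc
        · exact h
      have hcx : c < k x := hc _ hx'
      have hhead : (l ++ [x]).filter (fun z => decide (k z = c))
          = l.filter (fun z => decide (k z = c)) := by
        simp [List.filter_append]; intro h'; exact absurd h' hxc
      rw [insertBy_append_not]
      · rw [ih hpw' l x hx', hhead]
      · intro y hy
        have : k y = c := of_decide_eq_true (List.mem_filter.1 hy).2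
        simp [this]; exact le_of_lt hcx

-- folding insertBy over l₂ starting from the blocks of l₁ gives the blocks of l₁ ++ l₂
theorem foldl_insertBy_blocks {α κ : Type} [LinearOrder κ] (k : α → κ)
    (ks : List κ) (hpw : ks.Pairwise (· < ·)) :
    ∀ (l₂ l₁ : List α), (∀ x ∈ l₂, k x ∈ ks) →
      l₂.foldl (fun acc x => PySem.List.insertBy (fun a b => decide (k a < k b)) x acc)
          (ks.flatMap (fun c => l₁.filter (fun z => decide (k z = c))))
        = ks.flatMap (fun c => (l₁ ++ l₂).filter (fun z => decide (k z = c))) := by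
  intro l₂
  induction l₂ with
  | nil => intro l₁ _; simp
  | cons x l₂ ih =>
    intro l₁ hmem
    simp only [List.foldl_cons]
    rw [insertBy_blocks k ks hpw l₁ x (hmem x (by simp))]
    rw [ih (l₁ ++ [x]) (fun z hz => hmem z (by simp [hz]))]
    simp

-- the stable sort IS the concatenation of key blocks over any strictly increasing key list covering l
theorem sorted_eq_blocks {α κ : Type} [LinearOrder κ] (k : α → κ)
    (ks : List κ) (hpw : ks.Pairwise (· < ·)) (l : List α) (hcov : ∀ x ∈ l, k x ∈ ks) :
    PySem.List.sorted l k false = ks.flatMap (fun c => l.filter (fun z => decide (k z = c))) := by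
  rw [PySem.List.sorted_eq_foldl_insertBy]
  have h0 : ks.flatMap (fun c => ([] : List α).filter (fun z => decide (k z = c))) = [] := by simp
  have := foldl_insertBy_blocks k ks hpw l [] hcov
  rw [h0] at this
  simpa using this

-- flatMap of key-constant blocks commutes with filtering on the key
theorem flatMap_filter_key {α κ β : Type} [LinearOrder κ] (k : α → κ) (g : α → List β)
    (xs : List α) (c : κ) :
    (xs.flatMap (fun r => (g r).map (fun y => (k r, y)))).filter (fun p => decide (p.1 = c))
      = (xs.filter (fun r => decide (k r = c))).flatMap (fun r => (g r).map (fun y => (k r, y))) := by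
  induction xs with
  | nil => rfl
  | cons r xs ih =>
    simp only [List.flatMap_cons, List.filter_append, ih]
    by_cases h : k r = c
    · simp [h, List.filter_map, Function.comp_def]
    · simp [h, List.filter_map, Function.comp_def]

-- MAIN: stable sort of the tagged flattening = flattening of the stable sort
theorem sorted_flatMap_tagged {α κ β : Type} [LinearOrder κ] [BEq κ] [LawfulBEq κ]
    (k : α → κ) (g : α → List β) (xs : List α) :
    PySem.List.sorted (xs.flatMap (fun r => (g r).map (fun y => (k r, y)))) (fun p => p.1) false
      = (PySem.List.sorted xs k false).flatMap (fun r => (g r).map (fun y => (k r, y))) := by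
  set ks : List κ := PySem.List.sorted (PySem.Set.ofList (xs.map k)) (fun c => c) false with hks
  have hpw : ks.Pairwise (· < ·) := PySem.List.sorted_ofList_pairwise_lt (xs.map k)
  have hmemks : ∀ r ∈ xs, k r ∈ ks := by
    intro r hr
    rw [hks, PySem.List.mem_sorted, PySem.Set.mem_ofList]
    exact List.mem_map_of_mem hr
  rw [sorted_eq_blocks (fun p : κ × β => p.1) ks hpw _ (by
    intro p hp
    rcases List.mem_flatMap.1 hp with ⟨r, hr, hpr⟩
    rcases List.mem_map.1 hpr with ⟨y, _, rfl⟩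
    exact hmemks r hr)]
  rw [sorted_eq_blocks k ks hpw xs hmemks]
  rw [List.flatMap_assoc]
  exact List.flatMap_congr (fun c _ => flatMap_filter_key k g xs c)

-- unfold both ports to flatMap form
theorem portA_flatMap (selectables : List (List (String × String))) (source_refs : List (String × List (String × String))) (targets : List (String × String)) :
    source_ref_member_plan selectables source_refs targets
      = (@PySem.List.sorted _ _ srmOrd.toLT srmOrd.toDecidableLT selectables srmKey false).flatMap
          (fun row => (srmPipe (srmGetS row "source_ref_ids" "")).map
            (fun ref_id => srmRow source_refs targets (srmClean (srmGetS row "proposal_selectable_id" "")) ref_id)) := by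
  unfold source_ref_member_plan
  simp only [PySem.List.foldl_append_singleton_eq_map, PySem.List.foldl_append_eq_flatMap]
  simp

theorem portB_flatMap (selectables : List (List (String × String))) (source_refs : List (String × List (String × String))) (targets : List (String × String)) :
    source_ref_member_plan_alt selectables source_refs targets
      = (@PySem.List.sorted _ _ srmOrd.toLT srmOrd.toDecidableLT
          (selectables.flatMap (fun row =>
            ((srmPipe (srmGetS row "source_ref_ids" "")).map
              (fun ref_id => srmRow source_refs targets (srmClean (srmGetS row "proposal_selectable_id" "")) ref_id)).map
            (fun y => (srmKey row, y))))
          (fun p => p.1) false).map (fun p => p.2) := by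
  unfold source_ref_member_plan_alt
  simp only [PySem.List.foldl_append_singleton_eq_map, PySem.List.foldl_append_eq_flatMap]
  simp [srmKey, List.map_map, Function.comp_def]

-- ===== VERDICT (by name: the statement is the Claim_ definition above) =====
theorem source_ref_member_plan_spec : Claim_equal_source_ref_member_plan := by
  intro selectables source_refs targets _
  unfold Spec_source_ref_member_plan
  rw [portA_flatMap, portB_flatMap]
  have h := sorted_flatMap_tagged srmKey
    (fun row => (srmPipe (srmGetS row "source_ref_ids" "")).map
      (fun ref_id => srmRow source_refs targets (srmClean (srmGetS row "proposal_selectable_id" "")) ref_id))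
    selectables
  -- the LT instances on List String (core's and the LinearOrder's) are definitionally equal
  refine Eq.trans ?_ (congrArg (List.map (fun p => p.2)) h).symm
  simp [List.map_flatMap, List.map_map, Function.comp_def]
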